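-- pv_equiv track=rewrite | github.com/abhinavgupta96/Basic-Python | Max_Array.py | solution
-- ===== SOURCE A (Python) =====
-- def solution (A):
--   B =[x for x in A if x < 0] + [x for x in A if x > 1]
--   num = max(B)
--   ans = 0
--   for i in range(num-1,-1,-1):
--     if i not in B:
--       ans = i
--       break
--   return ans
-- ===== SOURCE B (Python) =====
-- def solution(A):
--     B = [x for x in A if x < 0] + [x for x in A if x > 1]
--     c = max(B) - 1
--     for b in sorted(set(B), reverse=True):
--         if b <= c:
--             if b < c:
--                 break
--             c -= 1
--     return c if c > 0 else 0
-- ===== Notes on version B (the rewrite author's own statement) =====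
-- stated objective: alternative
-- what changed: A's downward loop that re-scans the whole list B with 'i not in B' at every step is replaced by a single pass over sorted(set(B), reverse=True) that walks a counter down through the consecutive run below max(B) and stops at the first gap.
import Mathlib
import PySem

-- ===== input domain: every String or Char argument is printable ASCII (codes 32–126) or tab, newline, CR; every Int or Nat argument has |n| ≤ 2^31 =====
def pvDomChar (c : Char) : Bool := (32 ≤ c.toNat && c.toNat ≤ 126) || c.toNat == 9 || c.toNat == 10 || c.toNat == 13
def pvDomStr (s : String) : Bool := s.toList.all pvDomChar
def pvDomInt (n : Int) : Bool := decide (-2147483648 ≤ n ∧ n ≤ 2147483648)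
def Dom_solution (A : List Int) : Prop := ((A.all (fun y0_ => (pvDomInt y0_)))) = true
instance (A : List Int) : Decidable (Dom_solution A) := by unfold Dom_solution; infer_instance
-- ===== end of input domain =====

-- B replaces A's downward scan that re-tests 'i not in B' against the whole list at every
-- step by one pass over sorted(set(B), reverse=True) that walks down a counter (objective: alternative).

-- ===== PORT A =====
-- 'for i in range(num-1,-1,-1): if i not in B: ans = i; break' with ans initialised to 0;
-- the range is iterated lazily (i counts down from num-1 and stops at the break or below 0),
-- exactly as Python's for/range does.
def solutionLoop (B : List Int) (i : Int) : Int :=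
  if h : i < 0 then 0
  else if !(B.contains i) then i
  else solutionLoop B (i - 1)
termination_by (i + 1).toNat
decreasing_by omega

def solution (A : List Int) : Int :=
  let B := A.filter (fun x => x < 0) ++ A.filter (fun x => x > 1)
  match PySem.List.max? B (fun x => x) with
  | none => 0   -- Python raises ValueError here (max of empty); excluded by Pre_solution
  | some num => solutionLoop B (num - 1)

-- ===== PORT B =====
-- 'for b in sorted(set(B), reverse=True): if b <= c: (break if b < c else c -= 1)'
def altLoop (c : Int) : List Int → Int
  | [] => c
  | b :: rest =>
    if b ≤ c then (if b < c then c else altLoop (c - 1) rest) else altLoop c rest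

def solution_alt (A : List Int) : Int :=
  let B := A.filter (fun x => x < 0) ++ A.filter (fun x => x > 1)
  match PySem.List.max? B (fun x => x) with
  | none => 0   -- Python raises ValueError here (max of empty); excluded by Pre_solution
  | some num =>
    let c := altLoop (num - 1) (PySem.List.sorted (PySem.Set.ofList B) (fun x => x) true)
    if c > 0 then c else 0

-- ===== PRECONDITION & SPEC =====
-- A raises ValueError (max of an empty sequence) iff A contains no element < 0 and none > 1.
def Pre_solution (A : List Int) : Prop := ∃ x ∈ A, x < 0 ∨ x > 1
instance (A : List Int) : Decidable (Pre_solution A) := by unfold Pre_solution; infer_instance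
def pvWitness_solution : List Int := [2, -1, 5]

def Spec_solution (A : List Int) (out : Int) : Prop := out = solution_alt A
instance (A : List Int) (out : Int) : Decidable (Spec_solution A out) := by unfold Spec_solution; infer_instance

-- ===== CLAIM (what is proved, stated in full; the proofs are below) =====
def Claim_equal_solution : Prop := ∀ (A : List Int), Dom_solution A → Pre_solution A → Spec_solution A (solution A)

-- ===== LEMMAS AND PROOFS =====

theorem altLoop_le (S : List Int) : ∀ c : Int, altLoop c S ≤ c := by
  induction S with
  | nil => intro c; simp [altLoop]
  | cons b rest ih =>
    intro c
    simp only [altLoop]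
    split_ifs with h1 h2
    · exact le_rfl
    · have := ih (c - 1); omega
    · exact ih c

theorem loop_eq (B : List Int) : ∀ (S : List Int), S.Pairwise (fun a b => b < a) →
    ∀ i : Int, (∀ x : Int, x ≤ i → (x ∈ S ↔ x ∈ B)) →
    solutionLoop B i = (if altLoop i S > 0 then altLoop i S else 0) := by
  intro S
  induction S with
  | nil =>
    intro _ i hmem
    have hnB : i ∉ B := fun h => by simpa using (hmem i le_rfl).mpr h
    have hcont : B.contains i = false := by simpa using hnB
    rw [solutionLoop.eq_def]
    simp only [altLoop]
    by_cases hi : i < 0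
    · rw [dif_pos hi, if_neg (by omega)]
    · rw [dif_neg hi, hcont]
      simp only [Bool.not_false]
      split_ifs <;> omega
  | cons b rest ih =>
    intro hp i hmem
    obtain ⟨hb, hrest⟩ := List.pairwise_cons.mp hp
    by_cases hi : i < 0
    · rw [solutionLoop.eq_def, dif_pos hi]
      have hle := altLoop_le (b :: rest) i
      rw [if_neg (by omega)]
    · by_cases hbc : b ≤ i
      · by_cases hlt : b < i
        · -- first element below the counter: Python breaks, counter i is the answer
          have haL : altLoop i (b :: rest) = i := by simp [altLoop, hbc, hlt]
          rw [haL]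
          have hiS : i ∉ b :: rest := by
            intro h
            rcases List.mem_cons.mp h with h1 | h2
            · omega
            · have := hb i h2; omega
          have hnB : i ∉ B := fun h => hiS ((hmem i le_rfl).mpr h)
          have hcont : B.contains i = false := by simpa using hnB
          rw [solutionLoop.eq_def, dif_neg hi, hcont]
          simp only [Bool.not_false]
          split_ifs <;> omega
        · -- b = i: the counter element is in B, both sides step down
          have hbi : b = i := by omega
          have haL : altLoop i (b :: rest) = altLoop (i - 1) rest := by
            simp [altLoop, hbc, hlt]
          have hiB : i ∈ B := (hmem i le_rfl).mp (hbi ▸ List.mem_cons_self)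
          have hcont : B.contains i = true := by simpa using hiB
          rw [haL, solutionLoop.eq_def, dif_neg hi, hcont]
          simp only [Bool.not_true, Bool.false_eq_true, if_false]
          apply ih hrest (i - 1)
          intro x hx
          constructor
          · intro h; exact (hmem x (by omega)).mp (List.mem_cons_of_mem b h)
          · intro h
            rcases List.mem_cons.mp ((hmem x (by omega)).mpr h) with h1 | h2
            · omega
            · exact h2
      · -- b > i: Python B skips b; it is never tested by A's loop either
        have haL : altLoop i (b :: rest) = altLoop i rest := by simp [altLoop, hbc]
        rw [haL]
        apply ih hrest i
        intro x hx
        constructor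
        · intro h; exact (hmem x hx).mp (List.mem_cons_of_mem b h)
        · intro h
          rcases List.mem_cons.mp ((hmem x hx).mpr h) with h1 | h2
          · omega
          · exact h2

theorem solution_eq_alt (A : List Int) : solution A = solution_alt A := by
  unfold solution solution_alt
  cases hm : PySem.List.max? (A.filter (fun x => x < 0) ++ A.filter (fun x => x > 1))
      (fun x => x) with
  | none => simp [hm]
  | some num =>
    simp only [hm]
    have hnd : (PySem.List.sorted
        (PySem.Set.ofList (A.filter (fun x => x < 0) ++ A.filter (fun x => x > 1)))
        (fun x => x) true).Nodup :=
      (PySem.List.sorted_perm _ _ _).nodup_iff.mpr (PySem.Set.nodup_ofList _)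
    have hge := PySem.List.sorted_pairwise_rev
      (PySem.Set.ofList (A.filter (fun x => x < 0) ++ A.filter (fun x => x > 1))) (fun x => x)
    have hp := (hge.and hnd).imp
      (fun h => lt_of_le_of_ne h.1 (fun he => h.2 he.symm))
    refine loop_eq _ _ hp (num - 1) (fun x _ => ?_)
    rw [PySem.List.mem_sorted, PySem.Set.mem_ofList]

-- ===== VERDICT (by name: the statement is the Claim_ definition above) =====
theorem solution_spec : Claim_equal_solution := by
  intro A _ _
  unfold Spec_solution
  exact solution_eq_alt A
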